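-- pv_equiv track=rewrite | github.com/vosslab/bkchem | tools/measurelib/haworth_ring.py | find_candidate_cycles
-- ===== SOURCE A (Python) =====
-- def canonical_cycle_key(node_indexes: list[int]) -> tuple[int, ...]:
-- 	"""Return rotation- and direction-invariant tuple for one cycle."""
-- 	sequence = tuple(node_indexes)
-- 	reverse_sequence = tuple(reversed(node_indexes))
-- 	candidates = []
-- 	for sequence_variant in (sequence, reverse_sequence):
-- 		for start in range(len(sequence_variant)):
-- 			candidate = sequence_variant[start:] + sequence_variant[:start]
-- 			candidates.append(candidate)
-- 	return min(candidates)
--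
-- def find_candidate_cycles(adjacency: dict[int, set[int]], min_size: int = 5, max_size: int = 6) -> list[tuple[int, ...]]:
-- 	"""Find simple cycles of allowed sizes in one undirected adjacency graph."""
-- 	cycles: set[tuple[int, ...]] = set()
-- 	for start in sorted(adjacency.keys()):
-- 		stack = [(start, [start])]
-- 		while stack:
-- 			node_value, path = stack.pop()
-- 			if len(path) > max_size:
-- 				continue
-- 			for neighbor in adjacency.get(node_value, set()):
-- 				if neighbor == start and min_size <= len(path) <= max_size:
-- 					cycle = canonical_cycle_key(path[:])
-- 					cycles.add(cycle)
-- 					continue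
-- 				if neighbor in path:
-- 					continue
-- 				if len(path) >= max_size:
-- 					continue
-- 				stack.append((neighbor, path + [neighbor]))
-- 	return sorted(cycles)
-- ===== SOURCE B (Python) =====
-- def canonical_cycle_key(node_indexes: list[int]) -> tuple[int, ...]:
-- 	"""Return rotation- and direction-invariant tuple for one cycle."""
-- 	sequence = tuple(node_indexes)
-- 	reverse_sequence = tuple(reversed(node_indexes))
-- 	candidates = []
-- 	for sequence_variant in (sequence, reverse_sequence):
-- 		for start in range(len(sequence_variant)):
-- 			candidate = sequence_variant[start:] + sequence_variant[:start]
-- 			candidates.append(candidate)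
-- 	return min(candidates)
--
-- def find_candidate_cycles(adjacency: dict[int, set[int]], min_size: int = 5, max_size: int = 6) -> list[tuple[int, ...]]:
-- 	"""Find simple cycles of allowed sizes via a recursive depth-first walk."""
-- 	cycles: set[tuple[int, ...]] = set()
--
-- 	def dfs(start: int, node: int, path: list[int]) -> None:
-- 		for neighbor in adjacency.get(node, set()):
-- 			if neighbor == start and min_size <= len(path) <= max_size:
-- 				cycles.add(canonical_cycle_key(path))
-- 			elif neighbor not in path and len(path) < max_size:
-- 				dfs(start, neighbor, path + [neighbor])
--
-- 	for start in sorted(adjacency.keys()):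
-- 		dfs(start, start, [start])
-- 	return sorted(cycles)
-- ===== Notes on version B (the rewrite author's own statement) =====
-- stated objective: alternative
-- what changed: A's explicit-stack LIFO loop with per-state (node, path) tuples is replaced by a recursive depth-first walk dfs(start, node, path) that closes or extends the path directly; the canonical cycle key, all boundary predicates and the sorted-set output are kept identical.
import Mathlib
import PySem

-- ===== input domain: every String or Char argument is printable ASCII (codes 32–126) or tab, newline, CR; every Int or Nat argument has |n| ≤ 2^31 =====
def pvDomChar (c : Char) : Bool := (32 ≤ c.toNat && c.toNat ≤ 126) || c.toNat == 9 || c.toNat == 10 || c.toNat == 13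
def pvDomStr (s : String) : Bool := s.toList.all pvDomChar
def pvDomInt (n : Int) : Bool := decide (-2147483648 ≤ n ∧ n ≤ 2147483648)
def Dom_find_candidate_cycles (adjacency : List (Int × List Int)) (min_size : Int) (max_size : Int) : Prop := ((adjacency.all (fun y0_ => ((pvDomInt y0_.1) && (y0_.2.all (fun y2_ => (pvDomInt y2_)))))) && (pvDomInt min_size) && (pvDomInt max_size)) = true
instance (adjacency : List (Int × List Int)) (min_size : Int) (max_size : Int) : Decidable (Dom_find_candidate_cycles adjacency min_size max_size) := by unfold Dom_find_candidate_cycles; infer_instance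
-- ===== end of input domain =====

-- B replaces A's explicit-stack DFS by a recursive depth-first walk (same predicates,
-- same canonical cycle key, same sorted-set output); objective: alternative decomposition.

-- canonical_cycle_key : shared helper (identical in both Python files)
def canonical_cycle_key (node_indexes : List Int) : List Int :=
  let sequence := node_indexes
  let reverse_sequence := node_indexes.reverse
  let candidates := ([sequence, reverse_sequence]).foldl (fun acc sv =>
    acc ++ (PySem.List.pyRange 0 (sv.length : Int) 1).map (fun st =>
      PySem.List.slice sv (some st) none ++ PySem.List.slice sv none (some st))) []
  (PySem.List.min? candidates (fun x => x)).getD []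

-- adjacency.get(node, set()) : neighbour list of a node
def pvNbrs (d : PySem.Dict Int (List Int)) (n : Int) : List Int :=
  PySem.Dict.getD d n []

-- bound on the length of any neighbour list (used only for termination of runA)
def pvK (d : PySem.Dict Int (List Int)) : Nat :=
  d.items.foldl (fun acc p => max acc p.2.length) 0

lemma pvNbrs_len_le (d : PySem.Dict Int (List Int)) (n : Int) :
    (pvNbrs d n).length ≤ pvK d := by
  unfold pvNbrs pvK PySem.Dict.getD
  cases h : PySem.Dict.get? d n with
  | none => simp
  | some v =>
    have hmem := PySem.Dict.mem_items_of_get?_eq_some (d := d) h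
    simpa using (PySem.List.le_foldl_max_nat d.items (fun p => p.2.length) 0).2 _ hmem

-- potential of a DFS stack (termination measure of runA)
def pvMu (K : Nat) (max_size : Int) (st : List (Int × List Int)) : Nat :=
  (st.map (fun s => (K + 2) ^ ((max_size + 1 - (s.2.length : Int)).toNat))).sum

-- body of A's inner `for neighbor in adjacency.get(node_value, set())` loop
def stepA (start min_size max_size : Int) (path : List Int)
    (acc : PySem.Set (List Int) × List (Int × List Int)) (neighbor : Int) :
    PySem.Set (List Int) × List (Int × List Int) :=
  if neighbor = start ∧ min_size ≤ (path.length : Int) ∧ (path.length : Int) ≤ max_size then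
    (PySem.Set.add acc.1 (canonical_cycle_key path), acc.2)
  else if neighbor ∈ path then acc
  else if (path.length : Int) ≥ max_size then acc
  else (acc.1, (neighbor, path ++ [neighbor]) :: acc.2)

lemma pvMu_stepA_le (K : Nat) (start min_size max_size : Int) (path : List Int) :
    ∀ (ms : List Int) (acc : PySem.Set (List Int) × List (Int × List Int)),
      pvMu K max_size (ms.foldl (stepA start min_size max_size path) acc).2 ≤
        pvMu K max_size acc.2 + ms.length * (K + 2) ^ ((max_size - (path.length : Int)).toNat) := by
  intro ms
  induction ms with
  | nil => intro acc; simp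
  | cons m rest ih =>
    intro acc
    have hw : pvMu K max_size (stepA start min_size max_size path acc m).2 ≤
        pvMu K max_size acc.2 + (K + 2) ^ ((max_size - (path.length : Int)).toNat) := by
      unfold stepA
      split_ifs with h1 h2 h3
      · simp
      · simp
      · simp
      · simp only [pvMu, List.map_cons, List.sum_cons, List.length_append, List.length_cons,
          List.length_nil]
        have : ((max_size + 1 - ((path.length + 1 : Nat) : Int)).toNat) =
            (max_size - (path.length : Int)).toNat := by push_cast; omega
        rw [this]; omega
    calc pvMu K max_size ((m :: rest).foldl (stepA start min_size max_size path) acc).2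
        = pvMu K max_size (rest.foldl (stepA start min_size max_size path)
            (stepA start min_size max_size path acc m)).2 := by simp [List.foldl_cons]
      _ ≤ pvMu K max_size (stepA start min_size max_size path acc m).2 +
            rest.length * (K + 2) ^ ((max_size - (path.length : Int)).toNat) := ih _
      _ ≤ pvMu K max_size acc.2 + (m :: rest).length *
            (K + 2) ^ ((max_size - (path.length : Int)).toNat) := by
          simp only [List.length_cons]
          have := hw
          nlinarith [hw]

-- A's `while stack:` loop (stack top at the head of the list)
def runA (d : PySem.Dict Int (List Int)) (start min_size max_size : Int) :
    List (Int × List Int) → PySem.Set (List Int) → PySem.Set (List Int)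
  | [], cycles => cycles
  | (node_value, path) :: rest, cycles =>
    if (path.length : Int) > max_size then
      runA d start min_size max_size rest cycles
    else
      runA d start min_size max_size
        ((pvNbrs d node_value).foldl (stepA start min_size max_size path) (cycles, rest)).2
        ((pvNbrs d node_value).foldl (stepA start min_size max_size path) (cycles, rest)).1
termination_by st _ => pvMu (pvK d) max_size st
decreasing_by
  · simp only [pvMu, List.map_cons, List.sum_cons]
    have : 0 < (pvK d + 2) ^ ((max_size + 1 - (path.length : Int)).toNat) :=
      pow_pos (by omega : 0 < pvK d + 2) _
    omega
  · have hb := pvMu_stepA_le (pvK d) start min_size max_size path (pvNbrs d node_value)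
      (cycles, rest)
    have hlen := pvNbrs_len_le d node_value
    have hW : 0 < (pvK d + 2) ^ ((max_size - (path.length : Int)).toNat) :=
      pow_pos (by omega : 0 < pvK d + 2) _
    have hee : (max_size + 1 - (path.length : Int)).toNat =
        (max_size - (path.length : Int)).toNat + 1 := by omega
    simp only [pvMu, List.map_cons, List.sum_cons] at *
    rw [hee, pow_succ]
    have h1 : (pvNbrs d node_value).length *
        (pvK d + 2) ^ ((max_size - (path.length : Int)).toNat) ≤
        pvK d * (pvK d + 2) ^ ((max_size - (path.length : Int)).toNat) :=
      Nat.mul_le_mul_right _ hlen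
    nlinarith [hb, h1, hW]

-- ===== PORT A =====
def find_candidate_cycles (adjacency : List (Int × List Int)) (min_size : Int) (max_size : Int) : List (List Int) :=
  let d := PySem.Dict.ofList adjacency
  let cycles := (PySem.List.sorted (PySem.Dict.keys d) (fun x => x) false).foldl
    (fun cyc start => runA d start min_size max_size [(start, [start])] cyc) PySem.Set.empty
  PySem.List.sorted cycles (fun x => x) false

-- ===== PORT B =====
-- B's recursive dfs: `for neighbor in adjacency.get(node, set())` becomes structural
-- recursion over the remaining neighbour list ms; a call dfs(start, node, path) is
-- dfsB d start min_size max_size path (pvNbrs d node).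
def dfsB (d : PySem.Dict Int (List Int)) (start min_size max_size : Int) :
    List Int → List Int → PySem.Set (List Int) → PySem.Set (List Int)
  | _, [], cycles => cycles
  | path, neighbor :: ms, cycles =>
    if neighbor = start ∧ min_size ≤ (path.length : Int) ∧ (path.length : Int) ≤ max_size then
      dfsB d start min_size max_size path ms
        (PySem.Set.add cycles (canonical_cycle_key path))
    else if neighbor ∉ path ∧ (path.length : Int) < max_size then
      dfsB d start min_size max_size path ms
        (dfsB d start min_size max_size (path ++ [neighbor]) (pvNbrs d neighbor) cycles)
    else
      dfsB d start min_size max_size path ms cycles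
termination_by path ms _ => ((max_size + 1 - (path.length : Int)).toNat, ms.length)
decreasing_by
  · exact Prod.Lex.right _ (by simp)
  · apply Prod.Lex.left
    simp only [List.length_append, List.length_cons, List.length_nil]
    push_cast
    omega
  · exact Prod.Lex.right _ (by simp)
  · exact Prod.Lex.right _ (by simp)

def find_candidate_cycles_alt (adjacency : List (Int × List Int)) (min_size : Int) (max_size : Int) : List (List Int) :=
  let d := PySem.Dict.ofList adjacency
  let cycles := (PySem.List.sorted (PySem.Dict.keys d) (fun x => x) false).foldl
    (fun cyc start => dfsB d start min_size max_size [start] (pvNbrs d start) cyc)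
    PySem.Set.empty
  PySem.List.sorted cycles (fun x => x) false

-- ===== PRECONDITION & SPEC =====
def Spec_find_candidate_cycles (adjacency : List (Int × List Int)) (min_size : Int) (max_size : Int) (out : List (List Int)) : Prop := out = find_candidate_cycles_alt adjacency min_size max_size
instance (adjacency : List (Int × List Int)) (min_size : Int) (max_size : Int) (out : List (List Int)) : Decidable (Spec_find_candidate_cycles adjacency min_size max_size out) := by unfold Spec_find_candidate_cycles; infer_instance

-- ===== CLAIM (what is proved, stated in full; the proofs are below) =====
def Claim_equal_find_candidate_cycles : Prop := ∀ (adjacency : List (Int × List Int)) (min_size : Int) (max_size : Int), Dom_find_candidate_cycles adjacency min_size max_size → Spec_find_candidate_cycles adjacency min_size max_size (find_candidate_cycles adjacency min_size max_size)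

-- ===== LEMMAS AND PROOFS =====

-- the cycle keys A's inner loop adds while scanning the neighbour list ms of a node with path p
def emitList (s mS MS : Int) (p ms : List Int) : List (List Int) :=
  ms.filterMap (fun m =>
    if m = s ∧ mS ≤ (p.length : Int) ∧ (p.length : Int) ≤ MS then
      some (canonical_cycle_key p) else none)

-- the states A's inner loop pushes while scanning the neighbour list ms of a node with path p
def pushList (s mS MS : Int) (p ms : List Int) : List (Int × List Int) :=
  ms.filterMap (fun m =>
    if m = s ∧ mS ≤ (p.length : Int) ∧ (p.length : Int) ≤ MS then none
    else if m ∈ p then none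
    else if (p.length : Int) ≥ MS then none
    else some (m, p ++ [m]))

lemma foldA_eq (s mS MS : Int) (p : List Int) :
    ∀ (ms : List Int) (c : PySem.Set (List Int)) (st : List (Int × List Int)),
      ms.foldl (stepA s mS MS p) (c, st) =
        ((emitList s mS MS p ms).foldl (fun a k => PySem.Set.add a k) c,
         (pushList s mS MS p ms).reverse ++ st) := by
  intro ms
  induction ms with
  | nil => intro c st; simp [emitList, pushList]
  | cons m rest ih =>
    intro c st
    rw [List.foldl_cons, ih]
    show _ = ((emitList s mS MS p (m :: rest)).foldl _ c, (pushList s mS MS p (m :: rest)).reverse ++ st)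
    unfold stepA
    split_ifs with h1 h2 h3
    · simp [emitList, pushList, if_pos h1]
    · simp [emitList, pushList, if_neg h1, if_pos h2]
    · simp [emitList, pushList, if_neg h1, if_pos h3]
    · simp [emitList, pushList, if_neg h1, if_neg h2, if_neg h3]

lemma mem_emitList (s mS MS : Int) (p ms : List Int) (x : List Int) :
    x ∈ emitList s mS MS p ms ↔
      (∃ m ∈ ms, m = s ∧ mS ≤ (p.length : Int) ∧ (p.length : Int) ≤ MS) ∧
        x = canonical_cycle_key p := by
  simp only [emitList, List.mem_filterMap]
  constructor
  · rintro ⟨m, hm, hf⟩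
    split_ifs at hf with h
    · exact ⟨⟨m, hm, h⟩, (Option.some.inj hf).symm⟩
  · rintro ⟨⟨m, hm, h⟩, rfl⟩
    exact ⟨m, hm, by rw [if_pos h]⟩

lemma mem_pushList (s mS MS : Int) (p ms : List Int) (q : Int × List Int) :
    q ∈ pushList s mS MS p ms ↔
      ∃ m ∈ ms, (¬(m = s ∧ mS ≤ (p.length : Int) ∧ (p.length : Int) ≤ MS) ∧
        m ∉ p ∧ (p.length : Int) < MS) ∧ q = (m, p ++ [m]) := by
  simp only [pushList, List.mem_filterMap]
  constructor
  · rintro ⟨m, hm, hf⟩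
    split_ifs at hf with h1 h2 h3
    · exact ⟨m, hm, ⟨⟨h1, h2, by omega⟩, (Option.some.inj hf).symm⟩⟩
  · rintro ⟨m, hm, ⟨h1, h2, h3⟩, rfl⟩
    refine ⟨m, hm, ?_⟩
    rw [if_neg h1, if_neg h2, if_neg (by omega)]

-- a state whose path is already longer than max_size contributes nothing
lemma dfsB_dead (d : PySem.Dict Int (List Int)) (s mS MS : Int) (p : List Int)
    (h : MS < (p.length : Int)) :
    ∀ (ms : List Int) (c : PySem.Set (List Int)), dfsB d s mS MS p ms c = c := by
  intro ms
  induction ms with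
  | nil => intro c; rw [dfsB]
  | cons m rest ih =>
    intro c
    rw [dfsB, if_neg (by rintro ⟨_, _, h'⟩; omega), if_neg (by rintro ⟨_, h'⟩; omega)]
    exact ih c

-- dfsB only ever adds elements to the accumulator set
lemma dfsB_mem_split (d : PySem.Dict Int (List Int)) (s mS MS : Int)
    (p ms : List Int) (c : PySem.Set (List Int)) :
    ∀ (c' : PySem.Set (List Int)) (x : List Int),
      x ∈ dfsB d s mS MS p ms c' ↔ x ∈ c' ∨ x ∈ dfsB d s mS MS p ms [] := by
  induction p, ms, c using dfsB.induct d s mS MS with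
  | case1 p c => intro c' x; simp only [dfsB]; tauto
  | case2 p m rest c h1 ih =>
    intro c' x
    simp only [dfsB, if_pos h1]
    rw [ih (PySem.Set.add c' (canonical_cycle_key p)) x,
      ih (PySem.Set.add [] (canonical_cycle_key p)) x]
    simp only [PySem.Set.mem_add]
    tauto
  | case3 p m rest c h1 h2 ih_inner ih_outer =>
    intro c' x
    simp only [dfsB, if_neg h1, if_pos h2]
    rw [ih_outer (dfsB d s mS MS (p ++ [m]) (pvNbrs d m) c') x,
      ih_outer (dfsB d s mS MS (p ++ [m]) (pvNbrs d m) []) x,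
      ih_inner c' x]
    tauto
  | case4 p m rest c h1 h2 ih =>
    intro c' x
    simp only [dfsB, if_neg h1, if_neg h2]
    rw [ih c' x]

lemma dfsB_nodup (d : PySem.Dict Int (List Int)) (s mS MS : Int)
    (p ms : List Int) (c : PySem.Set (List Int)) :
    ∀ (c' : PySem.Set (List Int)), c'.Nodup → (dfsB d s mS MS p ms c').Nodup := by
  induction p, ms, c using dfsB.induct d s mS MS with
  | case1 p c => intro c' h; rw [dfsB]; exact h
  | case2 p m rest c h1 ih =>
    intro c' h
    rw [dfsB, if_pos h1]
    exact ih _ (PySem.Set.nodup_add _ _ h)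
  | case3 p m rest c h1 h2 ih_inner ih_outer =>
    intro c' h
    rw [dfsB, if_neg h1, if_pos h2]
    exact ih_outer _ (ih_inner _ h)
  | case4 p m rest c h1 h2 ih =>
    intro c' h
    rw [dfsB, if_neg h1, if_neg h2]
    exact ih _ h

-- full characterisation of what one dfsB call finds
lemma dfsB_mem_full (d : PySem.Dict Int (List Int)) (s mS MS : Int)
    (p ms : List Int) (c : PySem.Set (List Int)) :
    ∀ (x : List Int),
      x ∈ dfsB d s mS MS p ms ([] : PySem.Set (List Int)) ↔
        ((∃ m ∈ ms, m = s ∧ mS ≤ (p.length : Int) ∧ (p.length : Int) ≤ MS) ∧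
          x = canonical_cycle_key p) ∨
        ∃ m ∈ ms, (¬(m = s ∧ mS ≤ (p.length : Int) ∧ (p.length : Int) ≤ MS) ∧
          m ∉ p ∧ (p.length : Int) < MS) ∧
          x ∈ dfsB d s mS MS (p ++ [m]) (pvNbrs d m) ([] : PySem.Set (List Int)) := by
  induction p, ms, c using dfsB.induct d s mS MS with
  | case1 p c => intro x; rw [dfsB]; simp
  | case2 p m rest c h1 ih =>
    intro x
    rw [dfsB, if_pos h1, dfsB_mem_split d s mS MS p rest []]
    simp only [List.mem_cons, PySem.Set.mem_add]
    constructor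
    · rintro (h | h)
      · rcases h with h | h
        · simp at h
        · exact Or.inl ⟨⟨m, Or.inl rfl, h1⟩, h⟩
      · rw [ih] at h
        rcases h with ⟨⟨m', hm', hc⟩, rfl⟩ | ⟨m', hm', hc, hx⟩
        · exact Or.inl ⟨⟨m', Or.inr hm', hc⟩, rfl⟩
        · exact Or.inr ⟨m', Or.inr hm', hc, hx⟩
    · rintro (⟨⟨m', hm', hc⟩, rfl⟩ | ⟨m', hm', hc, hx⟩)
      · exact Or.inl (Or.inr rfl)
      · rcases hm' with rfl | hm'
        · exact absurd h1 hc.1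
        · exact Or.inr (by rw [ih]; exact Or.inr ⟨m', hm', hc, hx⟩)
  | case3 p m rest c h1 h2 ih_inner ih_outer =>
    intro x
    rw [dfsB, if_neg h1, if_pos h2, dfsB_mem_split d s mS MS p rest []]
    simp only [List.mem_cons]
    constructor
    · rintro (h | h)
      · exact Or.inr ⟨m, Or.inl rfl, ⟨h1, h2⟩, h⟩
      · rw [ih_outer] at h
        rcases h with ⟨⟨m', hm', hc⟩, rfl⟩ | ⟨m', hm', hc, hx⟩
        · exact Or.inl ⟨⟨m', Or.inr hm', hc⟩, rfl⟩
        · exact Or.inr ⟨m', Or.inr hm', hc, hx⟩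
    · rintro (⟨⟨m', hm', hc⟩, rfl⟩ | ⟨m', hm', hc, hx⟩)
      · rcases hm' with rfl | hm'
        · exact absurd hc h1
        · exact Or.inr (by rw [ih_outer]; exact Or.inl ⟨⟨m', hm', hc⟩, rfl⟩)
      · rcases hm' with rfl | hm'
        · exact Or.inl hx
        · exact Or.inr (by rw [ih_outer]; exact Or.inr ⟨m', hm', hc, hx⟩)
  | case4 p m rest c h1 h2 ih =>
    intro x
    rw [dfsB, if_neg h1, if_neg h2, ih]
    simp only [List.mem_cons]
    constructor
    · rintro (⟨⟨m', hm', hc⟩, rfl⟩ | ⟨m', hm', hc, hx⟩)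
      · exact Or.inl ⟨⟨m', Or.inr hm', hc⟩, rfl⟩
      · exact Or.inr ⟨m', Or.inr hm', hc, hx⟩
    · rintro (⟨⟨m', hm', hc⟩, rfl⟩ | ⟨m', hm', hc, hx⟩)
      · rcases hm' with rfl | hm'
        · exact absurd hc h1
        · exact Or.inl ⟨⟨m', hm', hc⟩, rfl⟩
      · rcases hm' with rfl | hm'
        · exact absurd ⟨hc.2.1, hc.2.2⟩ h2
        · exact Or.inr ⟨m', hm', hc, hx⟩

lemma nodup_foldl_add :
    ∀ (l : List (List Int)) (c : PySem.Set (List Int)), c.Nodup →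
      (l.foldl (fun a k => PySem.Set.add a k) c).Nodup := by
  intro l
  induction l with
  | nil => intro c h; exact h
  | cons k rest ih => intro c h; exact ih _ (PySem.Set.nodup_add _ _ h)

lemma mem_foldl_add' (l : List (List Int)) (c : PySem.Set (List Int)) (x : List Int) :
    x ∈ l.foldl (fun a k => PySem.Set.add a k) c ↔ x ∈ c ∨ ∃ k ∈ l, x = k := by
  simpa using PySem.Set.mem_foldl_add l (fun k => k) c x

-- A's stack loop finds, over the whole stack, exactly what dfsB finds state by state
lemma runA_mem (d : PySem.Dict Int (List Int)) (s mS MS : Int)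
    (st : List (Int × List Int)) (c : PySem.Set (List Int)) :
    ∀ (c' : PySem.Set (List Int)) (x : List Int),
      x ∈ runA d s mS MS st c' ↔
        x ∈ c' ∨ ∃ q ∈ st, x ∈ dfsB d s mS MS q.2 (pvNbrs d q.1) ([] : PySem.Set (List Int)) := by
  induction st, c using runA.induct d s mS MS with
  | case1 c => intro c' x; rw [runA]; simp
  | case2 n p rest c h ih =>
    intro c' x
    rw [runA, if_pos h, ih]
    simp only [List.mem_cons]
    constructor
    · rintro (hx | ⟨q, hq, hx⟩)
      · exact Or.inl hx
      · exact Or.inr ⟨q, Or.inr hq, hx⟩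
    · rintro (hx | ⟨q, hq, hx⟩)
      · exact Or.inl hx
      · rcases hq with rfl | hq
        · rw [dfsB_dead d s mS MS p (by simpa using h)] at hx
          simp at hx
        · exact Or.inr ⟨q, hq, hx⟩
  | case3 n p rest c h ih =>
    intro c' x
    rw [runA, if_neg h]
    simp only [foldA_eq] at ih ⊢
    rw [ih, mem_foldl_add']
    constructor
    · rintro ((hx | ⟨k, hk, rfl⟩) | ⟨q, hq, hx⟩)
      · exact Or.inl hx
      · rw [mem_emitList] at hk
        refine Or.inr ⟨(n, p), List.mem_cons_self .., ?_⟩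
        rw [dfsB_mem_full d s mS MS p _ ([])]
        exact Or.inl ⟨hk.1, hk.2⟩
      · rcases List.mem_append.1 hq with hq | hq
        · rw [List.mem_reverse, mem_pushList] at hq
          rcases hq with ⟨m, hm, hc, rfl⟩
          refine Or.inr ⟨(n, p), List.mem_cons_self .., ?_⟩
          rw [dfsB_mem_full d s mS MS p _ ([])]
          exact Or.inr ⟨m, hm, hc, hx⟩
        · exact Or.inr ⟨q, List.mem_cons_of_mem _ hq, hx⟩
    · rintro (hx | ⟨q, hq, hx⟩)
      · exact Or.inl (Or.inl hx)
      · rcases List.mem_cons.1 hq with rfl | hq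
        · rw [dfsB_mem_full d s mS MS p _ ([])] at hx
          rcases hx with ⟨he, rfl⟩ | ⟨m, hm, hc, hx⟩
          · exact Or.inl (Or.inr ⟨_, (mem_emitList s mS MS p _ _).2 ⟨he, rfl⟩, rfl⟩)
          · refine Or.inr ⟨(m, p ++ [m]), List.mem_append.2 (Or.inl ?_), hx⟩
            rw [List.mem_reverse, mem_pushList]
            exact ⟨m, hm, hc, rfl⟩
        · exact Or.inr ⟨q, List.mem_append.2 (Or.inr hq), hx⟩

lemma runA_nodup (d : PySem.Dict Int (List Int)) (s mS MS : Int)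
    (st : List (Int × List Int)) (c : PySem.Set (List Int)) :
    ∀ (c' : PySem.Set (List Int)), c'.Nodup → (runA d s mS MS st c').Nodup := by
  induction st, c using runA.induct d s mS MS with
  | case1 c => intro c' h; rw [runA]; exact h
  | case2 n p rest c h ih => intro c' hn; rw [runA, if_pos h]; exact ih _ hn
  | case3 n p rest c h ih =>
    intro c' hn
    rw [runA, if_neg h]
    simp only [foldA_eq] at ih ⊢
    exact ih _ (nodup_foldl_add _ _ hn)

-- both per-start folds build sets with the same members, and keep them duplicate-free
lemma fold_starts (d : PySem.Dict Int (List Int)) (mS MS : Int) :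
    ∀ (ks : List Int) (cA cB : PySem.Set (List Int)), cA.Nodup → cB.Nodup →
      (∀ x, x ∈ cA ↔ x ∈ cB) →
      (ks.foldl (fun cyc s => runA d s mS MS [(s, [s])] cyc) cA).Nodup ∧
      (ks.foldl (fun cyc s => dfsB d s mS MS [s] (pvNbrs d s) cyc) cB).Nodup ∧
      ∀ x, x ∈ ks.foldl (fun cyc s => runA d s mS MS [(s, [s])] cyc) cA ↔
        x ∈ ks.foldl (fun cyc s => dfsB d s mS MS [s] (pvNbrs d s) cyc) cB := by
  intro ks
  induction ks with
  | nil => intro cA cB hA hB hm; exact ⟨hA, hB, hm⟩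
  | cons s rest ih =>
    intro cA cB hA hB hm
    simp only [List.foldl_cons]
    refine ih _ _ (runA_nodup d s mS MS _ cA _ hA) (dfsB_nodup d s mS MS _ _ cB _ hB) ?_
    intro x
    rw [runA_mem d s mS MS _ cA, dfsB_mem_split d s mS MS _ _ cB]
    simp only [List.mem_singleton]
    constructor
    · rintro (hx | ⟨q, hq, hx⟩)
      · exact Or.inl ((hm x).1 hx)
      · rcases hq with rfl
        exact Or.inr hx
    · rintro (hx | hx)
      · exact Or.inl ((hm x).2 hx)
      · exact Or.inr ⟨(s, [s]), rfl, hx⟩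

-- ===== VERDICT (by name: the statement is the Claim_ definition above) =====
theorem find_candidate_cycles_spec : Claim_equal_find_candidate_cycles := by
  intro adjacency min_size max_size _
  unfold Spec_find_candidate_cycles
  simp only [find_candidate_cycles, find_candidate_cycles_alt]
  obtain ⟨hA, hB, hm⟩ := fold_starts (PySem.Dict.ofList adjacency) min_size max_size
    (PySem.List.sorted (PySem.Dict.keys (PySem.Dict.ofList adjacency)) (fun x => x) false)
    PySem.Set.empty PySem.Set.empty List.nodup_nil List.nodup_nil (fun _ => Iff.rfl)
  have key := PySem.List.sorted_eq_sorted_of_perm _ _ (fun x : List Int => x)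
    (fun a b h => h) ((List.perm_ext_iff_of_nodup hA hB).2 hm)
  convert key using 2
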